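-- pv_equiv track=rewrite | github.com/benekreng/midi_tester | remote_protocol_tester.py | pack_7bit
-- ===== SOURCE A (Python) =====
-- def pack_7bit(payload):
--     """Encode raw data bytes into 7-bit packed SysEx payload.
--
--     For each group of up to 7 bytes, prepend a top-bits byte where
--     bit N carries the MSB of data byte N in the group.
--     """
--     data = [int(v) & 0xFF for v in payload]
--     packed = []
--     idx = 0
--     while idx < len(data):
--         chunk = data[idx:idx + 7]
--         top = 0
--         body = []
--         for i, b in enumerate(chunk):
--             if b & 0x80:
--                 top |= (1 << i)
--             body.append(b & 0x7F)
--         packed.append(top)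
--         packed.extend(body)
--         idx += 7
--     return packed
-- ===== SOURCE B (Python) =====
-- def pack_7bit(payload):
--     """Encode raw data bytes into 7-bit packed SysEx payload.
--
--     Single flat pass: at each group boundary (i % 7 == 0) append a
--     placeholder top-bits byte and remember its index; MSBs are OR-ed
--     into it in place as the body bytes are appended.
--     """
--     data = [int(v) & 0xFF for v in payload]
--     packed = []
--     top_idx = 0
--     for i, b in enumerate(data):
--         if i % 7 == 0:
--             top_idx = len(packed)
--             packed.append(0)
--         packed.append(b & 0x7F)
--         if b & 0x80:
--             packed[top_idx] |= 1 << (i % 7)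
--     return packed
-- ===== Notes on version B (the rewrite author's own statement) =====
-- stated objective: alternative
-- what changed: Replaces A's slice-into-7-byte-chunks loop (building top and body per chunk, then appending both) with a single flat indexed pass that appends a placeholder top byte at each group boundary and back-patches its bits in place via packed[top_idx] |= 1 << (i % 7).
import Mathlib
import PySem

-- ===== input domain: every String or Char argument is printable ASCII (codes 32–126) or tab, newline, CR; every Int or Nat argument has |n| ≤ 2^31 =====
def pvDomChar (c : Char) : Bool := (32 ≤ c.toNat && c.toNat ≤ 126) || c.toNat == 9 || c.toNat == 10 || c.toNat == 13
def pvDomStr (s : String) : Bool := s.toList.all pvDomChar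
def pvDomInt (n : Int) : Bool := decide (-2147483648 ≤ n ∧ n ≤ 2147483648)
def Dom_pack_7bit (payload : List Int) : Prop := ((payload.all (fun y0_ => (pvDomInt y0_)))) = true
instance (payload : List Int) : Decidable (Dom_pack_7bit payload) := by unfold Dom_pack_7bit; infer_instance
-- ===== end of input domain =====

-- B replaces A's 7-byte-slice chunking with one flat indexed pass that back-patches the
-- group's top byte in place (alternative decomposition, same cost).

-- ===== PORT A =====
-- inner 'for i, b in enumerate(chunk)' step: update (top, body)
def astep (s : Int × List Int) (p : Int × Int) : Int × List Int :=
  ((if PySem.Int.band p.2 128 ≠ 0 then PySem.Int.bor s.1 ((1:Int) <<< p.1.toNat) else s.1),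
   s.2 ++ [PySem.Int.band p.2 127])

-- 'while idx < len(data)' with accumulator 'packed'
def packLoopA (data : List Int) (idx : Nat) (packed : List Int) : List Int :=
  if idx < data.length then
    let chunk := PySem.List.slice data (some (idx:Int)) (some ((idx:Int)+7))
    let tb := (PySem.List.enumerate chunk 0).foldl astep (0, [])
    packLoopA data (idx + 7) (packed ++ tb.1 :: tb.2)
  else packed
termination_by data.length - idx
decreasing_by omega

def pack_7bit (payload : List Int) : List Int :=
  packLoopA (payload.map (fun v => PySem.Int.band v 255)) 0 []

-- ===== PORT B =====
-- one step of the flat loop: state (packed, top_idx), element (i, b)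
def bstep (s : List Int × Nat) (p : Int × Int) : List Int × Nat :=
  let j := (PySem.Int.mod p.1 7).toNat
  let pt := if j = 0 then (s.1 ++ [(0:Int)], s.1.length) else s
  let packed := pt.1 ++ [PySem.Int.band p.2 127]
  if PySem.Int.band p.2 128 ≠ 0 then
    (packed.set pt.2 (PySem.Int.bor (packed.getD pt.2 0) ((1:Int) <<< j)), pt.2)
  else (packed, pt.2)

def pack_7bit_alt (payload : List Int) : List Int :=
  ((PySem.List.enumerate (payload.map (fun v => PySem.Int.band v 255)) 0).foldl bstep ([], 0)).1

-- ===== PRECONDITION & SPEC =====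
def Spec_pack_7bit (payload : List Int) (out : List Int) : Prop := out = pack_7bit_alt payload
instance (payload : List Int) (out : List Int) : Decidable (Spec_pack_7bit payload out) := by unfold Spec_pack_7bit; infer_instance

-- ===== CLAIM (what is proved, stated in full; the proofs are below) =====
def Claim_equal_pack_7bit : Prop := ∀ (payload : List Int), Dom_pack_7bit payload → Spec_pack_7bit payload (pack_7bit payload)

-- ===== LEMMAS AND PROOFS =====

-- chunked reference form of the result (proof-only helper)
def chunks : List Int → List Int
  | [] => []
  | b :: rest =>
    (((PySem.List.enumerate ((b :: rest).take 7) 0).foldl astep (0, [])).1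
      :: ((PySem.List.enumerate ((b :: rest).take 7) 0).foldl astep (0, [])).2)
      ++ chunks ((b :: rest).drop 7)
termination_by l => l.length
decreasing_by simp

theorem chunks_nil : chunks [] = [] := by rw [chunks.eq_def]

theorem chunks_cons (b : Int) (rest : List Int) : chunks (b :: rest) =
    (((PySem.List.enumerate ((b :: rest).take 7) 0).foldl astep (0, [])).1
      :: ((PySem.List.enumerate ((b :: rest).take 7) 0).foldl astep (0, [])).2)
      ++ chunks ((b :: rest).drop 7) := by rw [chunks.eq_def]

theorem set_mid (P rest : List Int) (t v : Int) :
    (P ++ t :: rest).set P.length v = P ++ v :: rest := by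
  induction P with
  | nil => rfl
  | cons a P ih => simp [ih]

theorem getD_mid (P rest : List Int) (t : Int) :
    (P ++ t :: rest).getD P.length 0 = t := by
  induction P with
  | nil => rfl
  | cons a P ih => simpa [List.getD] using ih

theorem inner_eq : ∀ (c : List Int) (q r : Nat) (t : Int) (body P : List Int),
    1 ≤ r → r + c.length ≤ 7 →
    List.foldl bstep (P ++ t :: body, P.length) (PySem.List.enumerate c ((7*q + r : Nat):Int))
    = (P ++ (List.foldl astep (t, body) (PySem.List.enumerate c ((r : Nat):Int))).1
         :: (List.foldl astep (t, body) (PySem.List.enumerate c ((r : Nat):Int))).2, P.length) := by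
  intro c
  induction c with
  | nil => intro q r t body P h1 h7; simp [PySem.List.enumerate_nil]
  | cons b c ih =>
    intro q r t body P h1 h7
    have hr7 : r < 7 := by simp at h7; omega
    rw [PySem.List.enumerate_cons, PySem.List.enumerate_cons]
    have hmod : (PySem.Int.mod ((7*q + r : Nat):Int) 7).toNat = r := by
      rw [PySem.Int.mod_eq_emod_of_pos (by norm_num : (0:Int) < 7)]
      have ha : ((7*q + r : Nat):Int) % 7 = (((7*q + r) % 7 : Nat) : Int) := by
        push_cast; omega
      have hb : (7*q + r) % 7 = r := by omega
      rw [ha, hb]; simp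
    have hstep : bstep (P ++ t :: body, P.length) (((7*q + r : Nat):Int), b)
        = (P ++ (astep (t, body) (((r : Nat):Int), b)).1
             :: (astep (t, body) (((r : Nat):Int), b)).2, P.length) := by
      have hne : (r = 0) = False := by simp; omega
      simp only [bstep, astep, hmod, hne, if_false]
      by_cases hb : PySem.Int.band b 128 ≠ 0
      · rw [if_pos hb, if_pos hb]
        have hassoc : (P ++ t :: body) ++ [PySem.Int.band b 127]
            = P ++ t :: (body ++ [PySem.Int.band b 127]) := by simp
        rw [hassoc, set_mid, getD_mid]
        simp
      · rw [if_neg hb, if_neg hb]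
        simp
    rw [List.foldl_cons, List.foldl_cons, hstep]
    have e1 : ((7*q + r : Nat):Int) + 1 = ((7*q + (r+1) : Nat):Int) := by push_cast; ring
    have e2 : ((r : Nat):Int) + 1 = (((r+1) : Nat):Int) := by push_cast; ring
    rw [e1, e2]
    exact ih q (r+1) _ _ P (by omega) (by simp at h7 ⊢; omega)

theorem chunk_eq (b : Int) (c : List Int) (q : Nat) (P : List Int) (t0 : Nat)
    (h : c.length ≤ 6) :
    List.foldl bstep (P, t0) (PySem.List.enumerate (b :: c) ((7*q : Nat):Int))
    = (P ++ (List.foldl astep (0, []) (PySem.List.enumerate (b :: c) 0)).1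
         :: (List.foldl astep (0, []) (PySem.List.enumerate (b :: c) 0)).2, P.length) := by
  rw [PySem.List.enumerate_cons, PySem.List.enumerate_cons]
  have hmod : (PySem.Int.mod ((7*q : Nat):Int) 7).toNat = 0 := by
    rw [PySem.Int.mod_eq_emod_of_pos (by norm_num : (0:Int) < 7)]
    have ha : ((7*q : Nat):Int) % 7 = (((7*q) % 7 : Nat) : Int) := by
      push_cast; omega
    have hb : (7*q) % 7 = 0 := by omega
    rw [ha, hb]; simp
  have hstep : bstep (P, t0) (((7*q : Nat):Int), b)
      = (P ++ (astep ((0:Int), ([]:List Int)) ((0:Int), b)).1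
           :: (astep ((0:Int), ([]:List Int)) ((0:Int), b)).2, P.length) := by
    simp only [bstep, astep, hmod, if_true]
    by_cases hb : PySem.Int.band b 128 ≠ 0
    · rw [if_pos hb, if_pos hb]
      have hassoc : (P ++ [(0:Int)]) ++ [PySem.Int.band b 127]
          = P ++ (0:Int) :: ([PySem.Int.band b 127]) := by simp
      rw [hassoc, set_mid, getD_mid]
      simp
    · rw [if_neg hb, if_neg hb]
      simp
  rw [List.foldl_cons, List.foldl_cons, hstep]
  have e1 : ((7*q : Nat):Int) + 1 = ((7*q + 1 : Nat):Int) := by push_cast; ring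
  have e2 : (0:Int) + 1 = ((1 : Nat):Int) := by norm_num
  rw [e1, e2]
  exact inner_eq c q 1 _ _ P (by omega) (by omega)

theorem outer_eq : ∀ (n : Nat) (data : List Int), data.length ≤ n →
    ∀ (q : Nat) (P : List Int) (t0 : Nat),
    (List.foldl bstep (P, t0) (PySem.List.enumerate data ((7*q : Nat):Int))).1
      = P ++ chunks data := by
  intro n
  induction n with
  | zero =>
    intro data h q P t0
    have : data = [] := List.eq_nil_of_length_eq_zero (by omega)
    subst this
    simp [chunks_nil, PySem.List.enumerate_nil]
  | succ n ih =>
    intro data h q P t0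
    match data with
    | [] => simp [chunks_nil, PySem.List.enumerate_nil]
    | b :: rest =>
      have hsplit : b :: rest = (b :: rest).take 7 ++ (b :: rest).drop 7 := by simp
      rw [hsplit, PySem.List.enumerate_append, List.foldl_append, ← hsplit]
      have htake : (b :: rest).take 7 = b :: rest.take 6 := by simp [List.take]
      have hlen6 : (rest.take 6).length ≤ 6 := by simp
      rw [htake, chunk_eq b (rest.take 6) q P t0 hlen6, ← htake]
      by_cases hlong : 7 ≤ (b :: rest).length
      · have hlen7 : ((b :: rest).take 7).length = 7 := by
          simp only [List.length_cons] at hlong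
          simp only [List.length_take, List.length_cons]
          omega
        rw [hlen7]
        have e : ((7*q : Nat):Int) + (7:Nat) = ((7*(q+1) : Nat):Int) := by push_cast; ring
        rw [e, ih ((b :: rest).drop 7)
              (by simp only [List.length_drop, List.length_cons] at h ⊢; omega) (q+1) _ _]
        rw [chunks_cons]
        simp [htake]
      · have hdrop : (b :: rest).drop 7 = [] := by
          refine List.drop_eq_nil_of_le ?_
          simp only [List.length_cons] at hlong ⊢
          omega
        rw [hdrop]
        simp only [PySem.List.enumerate_nil, List.foldl_nil]
        rw [chunks_cons, hdrop]
        simp [htake, chunks_nil]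

theorem packLoopA_eq : ∀ (n : Nat) (data : List Int) (idx : Nat) (packed : List Int),
    data.length - idx ≤ n →
    packLoopA data idx packed = packed ++ chunks (data.drop idx) := by
  intro n
  induction n with
  | zero =>
    intro data idx packed h
    rw [packLoopA]
    have hge : ¬ (idx < data.length) := by omega
    rw [if_neg hge]
    have hnil : data.drop idx = [] := List.drop_eq_nil_of_le (by omega)
    rw [hnil, chunks_nil]
    simp
  | succ n ih =>
    intro data idx packed h
    rw [packLoopA]
    by_cases hlt : idx < data.length
    · rw [if_pos hlt]
      have hslice : PySem.List.slice data (some (idx:Int)) (some ((idx:Int)+7))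
          = (data.drop idx).take 7 := by
        have h7 : ((idx:Int)+7) = ((idx:Int) + ((7:Nat):Int)) := by norm_num
        rw [h7, PySem.List.slice_natCast_add]
      have hdd : data.drop (idx + 7) = (data.drop idx).drop 7 := by
        rw [List.drop_drop]
      rw [ih data (idx+7) _ (by omega), hdd]
      obtain ⟨hd, tl, hcons⟩ : ∃ hd tl, data.drop idx = hd :: tl := by
        cases hc : data.drop idx with
        | nil =>
          exfalso
          have := List.length_drop (l := data) (i := idx)
          rw [hc] at this; simp at this; omega
        | cons hd tl => exact ⟨hd, tl, rfl⟩
      rw [hslice, hcons, chunks_cons, ← hcons]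
      simp [hcons]
    · rw [if_neg hlt]
      have hnil : data.drop idx = [] := List.drop_eq_nil_of_le (by omega)
      rw [hnil, chunks_nil]
      simp

-- ===== VERDICT (by name: the statement is the Claim_ definition above) =====
theorem pack_7bit_spec : Claim_equal_pack_7bit := by
  intro payload _
  show pack_7bit payload = pack_7bit_alt payload
  unfold pack_7bit pack_7bit_alt
  set data := payload.map (fun v => PySem.Int.band v 255) with hdata
  rw [packLoopA_eq data.length data 0 [] (by omega)]
  have e0 : (0:Int) = ((7*0 : Nat):Int) := by norm_num
  rw [e0, outer_eq data.length data (le_refl _) 0 [] 0]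
  simp
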